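-- pv_equiv track=rewrite | github.com/mpac123/RangeFiltering | bench/workload-gen/visualize_tree_tikz.py | generate_node
-- ===== SOURCE A (Python) =====
-- def generate_node(words, pos):
--     current = None
--     new_words = []
--     res = ""
--     for word in words:
--         if pos >= len(word):
--             continue
--         if current == None or word[pos] == current:
--             current = word[pos]
--             new_words.append(word)
--             continue
--         res += "[" + current + " " + generate_node(new_words, pos+1) + " ]"
--         current = word[pos]
--         new_words = []
--         new_words.append(word)
--     if current != None:
--         res += "[" + current + " " + generate_node(new_words, pos+1) + " ]"
--     return res
-- ===== SOURCE B (Python) =====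
-- def generate_node(words, pos):
--     stack = []  # chars of currently open trie nodes, stack[d] is at depth pos+d
--     out = []
--     for word in words:
--         d = 0
--         while d < len(stack) and pos + d < len(word) and word[pos + d] == stack[d]:
--             d += 1
--         if d < len(stack) and pos + d < len(word):
--             out.append(" ]" * (len(stack) - d))
--             del stack[d:]
--         while pos + len(stack) < len(word):
--             c = word[pos + len(stack)]
--             stack.append(c)
--             out.append("[" + c + " ")
--     out.append(" ]" * len(stack))
--     return "".join(out)
-- ===== Notes on version B (the rewrite author's own statement) =====
-- stated objective: alternative
-- what changed: Replaces A's recursive run-grouping (per-level state machine over current/new_words with recursion on pos) by a single non-recursive pass over the words that maintains an explicit stack of open bracket characters, closing and opening brackets per word.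
import Mathlib
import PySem

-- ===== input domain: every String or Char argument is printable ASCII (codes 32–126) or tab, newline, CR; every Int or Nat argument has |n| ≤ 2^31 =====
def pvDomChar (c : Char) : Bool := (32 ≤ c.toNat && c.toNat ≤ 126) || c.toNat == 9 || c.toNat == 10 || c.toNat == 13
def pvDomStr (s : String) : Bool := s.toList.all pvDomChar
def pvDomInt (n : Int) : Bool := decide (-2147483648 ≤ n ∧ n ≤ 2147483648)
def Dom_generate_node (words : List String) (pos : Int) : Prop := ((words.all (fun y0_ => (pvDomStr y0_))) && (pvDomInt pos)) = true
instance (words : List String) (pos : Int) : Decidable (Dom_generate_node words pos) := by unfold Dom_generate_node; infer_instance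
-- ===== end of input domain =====

-- B replaces A's recursive grouping with a single non-recursive pass that keeps an explicit
-- stack of currently open bracket characters; objective: alternative algorithm, same cost.

-- word[pos] (Python indexing, possibly negative). Inside Pre_ the index is always valid;
-- the ' ' default is never reached there.
def pvCharAt (w : String) (pos : Int) : Char := (PySem.Str.pyGet? w pos).getD ' '

-- fuel: Python's recursion increases pos by 1 each level and only recurses while some word is
-- longer than pos, so this bound strictly dominates the recursion depth on every input.
def pvFuel (words : List String) (pos : Int) : Nat :=
  words.foldr (fun w m => max (PySem.Str.len w).toNat m) 0 + (-pos).toNat + 1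

-- ===== PORT A =====
mutual
-- the body of A's for-loop, state = (current, new_words, res)
def stepA : Nat → Int → (Option Char × List String × String) → String → (Option Char × List String × String)
  | n, pos, (cur, nw, res), w =>
    if PySem.Str.len w ≤ pos then (cur, nw, res)      -- 'if pos >= len(word): continue'
    else
      let c := pvCharAt w pos
      match cur with
      | none => (some c, nw ++ [w], res)
      | some c0 =>
        if c == c0 then (some c0, nw ++ [w], res)
        else (some c, [w], res ++ "[" ++ c0.toString ++ " " ++ genAFuel n nw (pos + 1) ++ " ]")
  termination_by n _ _ _ => (n, 1)
-- the final 'if current != None' flush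
def flushA : Nat → Int → (Option Char × List String × String) → String
  | _, _, (none, _, res) => res
  | n, pos, (some c0, nw, res) => res ++ "[" ++ c0.toString ++ " " ++ genAFuel n nw (pos + 1) ++ " ]"
  termination_by n _ _ => (n, 1)
def genAFuel : Nat → List String → Int → String
  | 0, _, _ => ""
  | n + 1, words, pos => flushA n pos (words.foldl (stepA n pos) (none, [], ""))
  termination_by n _ _ => (n, 0)
end

def generate_node (words : List String) (pos : Int) : String :=
  genAFuel (pvFuel words pos) words pos

-- ===== PORT B =====
-- Source B's inner matching while-loop: how many stack entries (depth-first) the word agrees with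
def dLoopB : List Char → String → Int → Nat
  | [], _, _ => 0
  | c :: rest, w, pos =>
    if pos < PySem.Str.len w ∧ pvCharAt w pos = c then dLoopB rest w (pos + 1) + 1 else 0

-- " ]" * n
def closesB : Nat → String
  | 0 => ""
  | n + 1 => closesB n ++ " ]"

-- Source B's push while-loop: chars of w from index j on, with their "[c " output pieces
def pushFromB (w : String) (j : Int) : List Char × String :=
  if _h : j < PySem.Str.len w then
    let c := pvCharAt w j
    let r := pushFromB w (j + 1)
    (c :: r.1, "[" ++ c.toString ++ " " ++ r.2)
  else ([], "")
  termination_by (PySem.Str.len w - j).toNat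
  decreasing_by simp_wf; simp only [PySem.Str.len_eq, String.length_toList] at *; omega

-- Source B's for-loop body, state = (stack, out); stack head = shallowest open bracket
def stepB (pos : Int) : (List Char × String) → String → (List Char × String)
  | (stack, out), w =>
    let d := dLoopB stack w pos
    let s1 :=
      if d < stack.length ∧ pos + d < PySem.Str.len w
      then (stack.take d, out ++ closesB (stack.length - d))
      else (stack, out)
    let p := pushFromB w (pos + s1.1.length)
    (s1.1 ++ p.1, s1.2 ++ p.2)

def generate_node_alt (words : List String) (pos : Int) : String :=
  let r := words.foldl (stepB pos) ([], "")
  r.2 ++ closesB r.1.length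

-- ===== PRECONDITION & SPEC =====
-- Pre_ excludes exactly the inputs where Python A raises IndexError: a negative pos reaching
-- below -len(word) for some word (every word is indexed at the top level unless pos ≥ len(word),
-- which for pos < 0 never skips).
def Pre_generate_node (words : List String) (pos : Int) : Prop :=
  ∀ w ∈ words, -(PySem.Str.len w) ≤ pos
instance (words : List String) (pos : Int) : Decidable (Pre_generate_node words pos) := by
  unfold Pre_generate_node; infer_instance

def pvWitness_generate_node : List String × Int := (["ab", "ac", "b", "ab"], 0)

def Spec_generate_node (words : List String) (pos : Int) (out : String) : Prop := out = generate_node_alt words pos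
instance (words : List String) (pos : Int) (out : String) : Decidable (Spec_generate_node words pos out) := by unfold Spec_generate_node; infer_instance

-- ===== CLAIM (what is proved, stated in full; the proofs are below) =====
def Claim_equal_generate_node : Prop := ∀ (words : List String) (pos : Int), Dom_generate_node words pos → Pre_generate_node words pos → Spec_generate_node words pos (generate_node words pos)

-- ===== LEMMAS AND PROOFS =====

-- Proof-only intermediate M: the run-splitting formulation (filter the too-short words, peel
-- one maximal run of equal pos-characters per step).  We prove A = M and M = B.
def runLenM : List String → Char → Int → Nat
  | [], _, _ => 0
  | w :: rest, c, pos => if pvCharAt w pos == c then runLenM rest c pos + 1 else 0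

mutual
def loopM : Nat → List String → Int → String → String
  | _, [], _, res => res
  | n, w :: rest, pos, res =>
    let c := pvCharAt w pos
    let k := runLenM rest c pos + 1
    loopM n ((w :: rest).drop k) pos
      (res ++ "[" ++ c.toString ++ " " ++ genMFuel n ((w :: rest).take k) (pos + 1) ++ " ]")
  termination_by n ws _ _ => (n, ws.length + 1)
def genMFuel : Nat → List String → Int → String
  | 0, _, _ => ""
  | n + 1, words, pos => loopM n (words.filter (fun w => pos < PySem.Str.len w)) pos ""
  termination_by n _ _ => (n, 0)
end

theorem runLenM_le (ws : List String) (c : Char) (pos : Int) : runLenM ws c pos ≤ ws.length := by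
  induction ws with
  | nil => simp [runLenM]
  | cons w rest ih =>
    simp only [runLenM, List.length_cons]
    split
    · omega
    · omega

theorem str_append_push (s t : String) (c : Char) : (s ++ t).push c = s ++ t.push c := by
  rw [String.push_eq_append, String.push_eq_append, String.append_assoc]

theorem pv_split (c : Char) (X : String) :
    (" ][" : String).push c ++ X = " ]" ++ ("[".push c ++ X) := by
  have h : (" ][" : String) = " ]" ++ "[" := by decide
  rw [h, str_append_push, String.append_assoc]

-- folding a function that skips the elements failing p equals folding over the filtered list
theorem foldl_filter_of_skip {α β : Type} (f : α → β → α) (p : β → Bool)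
    (h : ∀ s w, p w = false → f s w = s) :
    ∀ (l : List β) (s : α), l.foldl f s = (l.filter p).foldl f s := by
  intro l
  induction l with
  | nil => intro s; rfl
  | cons w rest ih =>
    intro s
    by_cases hp : p w = true
    · simp [hp, List.foldl_cons, ih]
    · have hp' : p w = false := by simpa using hp
      simp [hp', List.foldl_cons, h s w hp', ih]

-- loopM's res parameter is a pure accumulator
theorem loopM_acc (n : Nat) (pos : Int) :
    ∀ (m : Nat) (ws : List String), ws.length ≤ m →
    ∀ (res : String), loopM n ws pos res = res ++ loopM n ws pos "" := by
  intro m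
  induction m with
  | zero =>
    intro ws hws res
    have : ws = [] := by cases ws <;> simp_all
    subst this
    simp [loopM]
  | succ m ih =>
    intro ws hws res
    cases ws with
    | nil => simp [loopM]
    | cons w rest =>
      have hlen : ((w :: rest).drop (runLenM rest (pvCharAt w pos) pos + 1)).length ≤ m := by
        have := runLenM_le rest (pvCharAt w pos) pos
        simp only [List.length_cons] at hws
        simp only [List.drop_succ_cons, List.length_drop]
        omega
      simp only [loopM]
      conv_lhs => rw [ih _ hlen]
      conv_rhs => rw [ih _ hlen]
      simp [String.append_assoc, str_append_push]

-- the main invariant of the A = M proof: folding A's step from state (some c0, nw, res) over an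
-- all-eligible list produces res, then the c0-run group, then M's loop over the remainder
theorem mainInv (n : Nat) (pos : Int)
    (ihn : ∀ ws p, genAFuel n ws p = genMFuel n ws p) :
    ∀ (m : Nat) (ws : List String), ws.length ≤ m →
    (∀ w ∈ ws, pos < PySem.Str.len w) →
    ∀ (c0 : Char) (nw : List String) (res : String),
    flushA n pos (ws.foldl (stepA n pos) (some c0, nw, res)) =
      res ++ "[" ++ c0.toString ++ " " ++ genAFuel n (nw ++ ws.take (runLenM ws c0 pos)) (pos + 1) ++ " ]"
        ++ loopM n (ws.drop (runLenM ws c0 pos)) pos "" := by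
  intro m
  induction m with
  | zero =>
    intro ws hws helig c0 nw res
    have hnil : ws = [] := by cases ws <;> simp_all
    subst hnil
    simp [flushA, runLenM, loopM]
  | succ m ih =>
    intro ws hws helig c0 nw res
    cases ws with
    | nil => simp [flushA, runLenM, loopM]
    | cons w rest =>
      have hw : pos < PySem.Str.len w := helig w (by simp)
      have hrest : ∀ w' ∈ rest, pos < PySem.Str.len w' := fun w' hm => helig w' (List.mem_cons_of_mem _ hm)
      have hlen : rest.length ≤ m := by simp only [List.length_cons] at hws; omega
      simp only [List.foldl_cons, stepA]
      rw [if_neg (by omega : ¬ PySem.Str.len w ≤ pos)]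
      cases hc : pvCharAt w pos == c0 with
      | true =>
        simp only [if_true]
        rw [ih rest hlen hrest c0 (nw ++ [w]) res]
        simp only [runLenM, hc, if_pos, List.take_succ_cons, List.drop_succ_cons]
        have hx : (nw ++ [w]) ++ List.take (runLenM rest c0 pos) rest
            = nw ++ w :: List.take (runLenM rest c0 pos) rest := by simp
        rw [hx]
      | false =>
        simp only [Bool.false_eq_true, if_false]
        rw [ih rest hlen hrest (pvCharAt w pos) [w]
          (res ++ "[" ++ c0.toString ++ " " ++ genAFuel n nw (pos + 1) ++ " ]")]
        have hrl : runLenM (w :: rest) c0 pos = 0 := by simp [runLenM, hc]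
        rw [hrl]
        simp only [List.take_zero, List.drop_zero, List.append_nil, loopM, List.take_succ_cons,
          List.drop_succ_cons]
        conv_rhs => rw [loopM_acc n pos (rest.drop (runLenM rest (pvCharAt w pos) pos)).length _ le_rfl]
        simp [String.append_assoc, str_append_push, ihn]
        rw [pv_split]

theorem genAM (n : Nat) : ∀ (words : List String) (pos : Int), genAFuel n words pos = genMFuel n words pos := by
  induction n with
  | zero => intro words pos; simp [genAFuel, genMFuel]
  | succ n ihn =>
    intro words pos
    simp only [genAFuel, genMFuel]
    rw [foldl_filter_of_skip (stepA n pos) (fun w => decide (pos < PySem.Str.len w))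
      (by
        intro s w hp
        obtain ⟨cur, nw, res⟩ := s
        simp only [decide_eq_false_iff_not, not_lt] at hp
        simp only [stepA]
        rw [if_pos hp])]
    cases hf : words.filter (fun w => decide (pos < PySem.Str.len w)) with
    | nil => simp [flushA, loopM]
    | cons w rest =>
      have helig : ∀ w' ∈ w :: rest, pos < PySem.Str.len w' := by
        intro w' hm
        have := List.of_mem_filter (hf ▸ hm)
        simpa using this
      have hw : pos < PySem.Str.len w := helig w (by simp)
      simp only [List.foldl_cons, stepA]
      rw [if_neg (by omega : ¬ PySem.Str.len w ≤ pos)]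
      rw [mainInv n pos ihn rest.length rest le_rfl
        (fun w' hm => helig w' (List.mem_cons_of_mem _ hm)) (pvCharAt w pos) ([] ++ [w]) ""]
      simp only [loopM, List.take_succ_cons, List.drop_succ_cons]
      conv_rhs => rw [loopM_acc n pos (rest.drop (runLenM rest (pvCharAt w pos) pos)).length _ le_rfl]
      simp [String.append_assoc, ihn]

-- =========================  M = B  =========================

-- a word that is too short for this level is a no-op of B's step
theorem stepB_skip (pos : Int) (st : List Char) (out : String) (w : String)
    (h : PySem.Str.len w ≤ pos) : stepB pos (st, out) w = (st, out) := by
  have hd : dLoopB st w pos = 0 := by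
    cases st with
    | nil => rfl
    | cons c r =>
      simp only [dLoopB]
      rw [if_neg]
      rintro ⟨h1, -⟩
      omega
  simp only [stepB, hd]
  rw [if_neg (by rintro ⟨-, h2⟩; omega)]
  rw [pushFromB, dif_neg (by
    show ¬ pos + (st.length : Int) < PySem.Str.len w
    have : (0:Int) ≤ (st.length : Int) := by positivity
    omega)]
  simp

-- B's step from an empty stack just pushes the word's suffix
theorem stepB_empty (pos : Int) (out : String) (w : String) :
    stepB pos ([], out) w = ((pushFromB w pos).1, out ++ (pushFromB w pos).2) := by
  simp [stepB, dLoopB]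

-- shift lemma: with matching stack head c, B's step at pos behaves as B's step at pos+1 below c
theorem stepB_shift (pos : Int) (c : Char) (s : List Char) (out : String) (w : String)
    (h : pos < PySem.Str.len w → pvCharAt w pos = c) :
    stepB pos (c :: s, out) w = (c :: (stepB (pos + 1) (s, out) w).1, (stepB (pos + 1) (s, out) w).2) := by
  by_cases hlt : pos < PySem.Str.len w
  · have hc : pvCharAt w pos = c := h hlt
    have hd : dLoopB (c :: s) w pos = dLoopB s w (pos + 1) + 1 := by
      have hlt' := hlt
      rw [PySem.Str.len_eq, String.length_toList] at hlt'
      simp [dLoopB, hc, hlt']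
    simp only [stepB, hd, List.length_cons]
    by_cases hp : dLoopB s w (pos + 1) < s.length ∧ pos + 1 + (dLoopB s w (pos + 1) : Int) < PySem.Str.len w
    · rw [if_pos (by omega), if_pos (by omega)]
      simp only [List.take_succ_cons, List.length_cons, List.length_take]
      have harg : s.length + 1 - (dLoopB s w (pos + 1) + 1) = s.length - dLoopB s w (pos + 1) := by omega
      rw [harg]
      have hidx : pos + ((min (dLoopB s w (pos + 1)) s.length + 1 : Nat) : Int)
          = pos + 1 + ((min (dLoopB s w (pos + 1)) s.length : Nat) : Int) := by push_cast; omega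
      rw [hidx]
      simp
    · rw [if_neg (by omega), if_neg (by omega)]
      simp
      rw [show pos + ((s.length : Int) + 1) = pos + 1 + (s.length : Int) from by ring]
      exact ⟨rfl, rfl⟩
  · have h1 : PySem.Str.len w ≤ pos := by omega
    rw [stepB_skip pos (c :: s) out w h1, stepB_skip (pos + 1) s out w (by omega)]

theorem foldB_shift (pos : Int) (c : Char) :
    ∀ (ws : List String) (s : List Char) (out : String),
    (∀ w ∈ ws, pos < PySem.Str.len w → pvCharAt w pos = c) →
    ws.foldl (stepB pos) (c :: s, out)
      = (c :: (ws.foldl (stepB (pos + 1)) (s, out)).1, (ws.foldl (stepB (pos + 1)) (s, out)).2) := by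
  intro ws
  induction ws with
  | nil => intro s out _; rfl
  | cons w rest ih =>
    intro s out hall
    simp only [List.foldl_cons]
    rw [stepB_shift pos c s out w (hall w (by simp))]
    rw [ih _ _ (fun w' hm => hall w' (List.mem_cons_of_mem _ hm))]

-- break lemma: a mismatching head closes everything and restarts from the empty stack
theorem stepB_break (pos : Int) (c : Char) (st : List Char) (out : String) (w : String)
    (hlt : pos < PySem.Str.len w) (hne : pvCharAt w pos ≠ c) :
    stepB pos (c :: st, out) w = stepB pos ([], out ++ closesB (st.length + 1)) w := by
  have hd : dLoopB (c :: st) w pos = 0 := by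
    simp only [dLoopB]
    rw [if_neg]
    rintro ⟨-, h2⟩
    exact hne h2
  have hnil : dLoopB [] w pos = 0 := rfl
  simp only [stepB, hd, hnil, List.length_cons]
  rw [if_pos ⟨Nat.succ_pos _, by simpa using hlt⟩, if_neg (by rintro ⟨h1, -⟩; simp at h1)]
  simp

-- out is a pure accumulator of B's fold
theorem stepB_acc (pos : Int) (st : List Char) (out : String) (w : String) :
    stepB pos (st, out) w = ((stepB pos (st, "") w).1, out ++ (stepB pos (st, "") w).2) := by
  simp only [stepB]
  by_cases hp : dLoopB st w pos < st.length ∧ pos + (dLoopB st w pos : Int) < PySem.Str.len w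
  · rw [if_pos hp, if_pos hp]
    simp [String.append_assoc]
  · rw [if_neg hp, if_neg hp]
    simp

theorem foldB_acc (pos : Int) :
    ∀ (ws : List String) (st : List Char) (out : String),
    ws.foldl (stepB pos) (st, out)
      = ((ws.foldl (stepB pos) (st, "")).1, out ++ (ws.foldl (stepB pos) (st, "")).2) := by
  intro ws
  induction ws with
  | nil => intro st out; simp
  | cons w rest ih =>
    intro st out
    simp only [List.foldl_cons]
    rw [stepB_acc pos st out w, stepB_acc pos st "" w]
    simp only [String.empty_append]
    rw [ih ((stepB pos (st, "") w).1) (out ++ (stepB pos (st, "") w).2)]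
    conv_rhs => rw [ih ((stepB pos (st, "") w).1) ((stepB pos (st, "") w).2)]
    simp [String.append_assoc]

theorem runLenM_take (pos : Int) (c : Char) :
    ∀ (ws : List String), ∀ w ∈ ws.take (runLenM ws c pos), pvCharAt w pos = c := by
  intro ws
  induction ws with
  | nil => intro w hm; simp at hm
  | cons w0 rest ih =>
    intro w hm
    simp only [runLenM] at hm
    by_cases hc : pvCharAt w0 pos == c
    · rw [if_pos hc, List.take_succ_cons] at hm
      rcases List.mem_cons.1 hm with h | h
      · subst h; exact eq_of_beq hc
      · exact ih w h
    · rw [if_neg hc, List.take_zero] at hm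
      simp at hm

theorem runLenM_drop (pos : Int) (c : Char) :
    ∀ (ws : List String) (w : String) (tl : List String),
    ws.drop (runLenM ws c pos) = w :: tl → pvCharAt w pos ≠ c := by
  intro ws
  induction ws with
  | nil => intro w tl h; simp at h
  | cons w0 rest ih =>
    intro w tl h
    simp only [runLenM] at h
    by_cases hc : pvCharAt w0 pos == c
    · rw [if_pos hc, List.drop_succ_cons] at h
      exact ih w tl h
    · rw [if_neg hc, List.drop_zero] at h
      obtain ⟨h1, -⟩ := List.cons.injEq .. ▸ h
      injection h with h1 h2
      subst h1
      simpa using hc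

-- one level of the M = B proof: over an all-eligible list, B's stack machine from the empty
-- stack produces exactly M's run-splitting loop
theorem auxB (n : Nat)
    (ihn : ∀ (ws : List String) (pos : Int) (out : String),
      (∀ w ∈ ws, PySem.Str.len w ≤ pos + n) →
      (ws.foldl (stepB pos) ([], out)).2 ++ closesB (ws.foldl (stepB pos) ([], out)).1.length
        = out ++ genMFuel (n + 1) ws pos) :
    ∀ (m : Nat) (ws : List String) (pos : Int) (out : String), ws.length ≤ m →
    (∀ w ∈ ws, pos < PySem.Str.len w ∧ PySem.Str.len w ≤ pos + (n + 1)) →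
    (ws.foldl (stepB pos) ([], out)).2 ++ closesB (ws.foldl (stepB pos) ([], out)).1.length
      = out ++ loopM (n + 1) ws pos "" := by
  intro m
  induction m with
  | zero =>
    intro ws pos out hlen _
    have hnil : ws = [] := by cases ws <;> simp_all
    subst hnil
    simp [loopM, closesB]
  | succ m ih =>
    intro ws pos out hlen hall
    cases ws with
    | nil => simp [loopM, closesB]
    | cons w rest =>
      obtain ⟨hwlt, hwle⟩ := hall w (by simp)
      -- notation
      have hrunc : ∀ w' ∈ rest.take (runLenM rest (pvCharAt w pos) pos),
          pos < PySem.Str.len w' → pvCharAt w' pos = pvCharAt w pos :=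
        fun w' hm _ => runLenM_take pos (pvCharAt w pos) rest w' hm
      -- the inner level equation from ihn, applied to the first run
      have hbound : ∀ w' ∈ w :: rest.take (runLenM rest (pvCharAt w pos) pos),
          PySem.Str.len w' ≤ (pos + 1) + n := by
        intro w' hm
        rcases List.mem_cons.1 hm with h | h
        · subst h; omega
        · have := (hall w' (List.mem_cons_of_mem _ (List.take_subset _ _ h))).2
          push_cast at this ⊢; omega
      have hF := ihn (w :: rest.take (runLenM rest (pvCharAt w pos) pos)) (pos + 1) "" hbound
      rw [List.foldl_cons, stepB_empty, String.empty_append, foldB_acc (pos + 1)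
        (rest.take (runLenM rest (pvCharAt w pos) pos))
        (pushFromB w (pos + 1)).1 (pushFromB w (pos + 1)).2] at hF
      simp only [String.empty_append] at hF
      -- unfold M's loop once on the right
      conv_rhs => rw [loopM]
      simp only [List.take_succ_cons, List.drop_succ_cons, String.empty_append]
      rw [loopM_acc (n + 1) pos (rest.drop (runLenM rest (pvCharAt w pos) pos)).length _ le_rfl]
      -- decompose B's fold on the left: first word, then the rest of the run, then the remainder
      conv_lhs => rw [List.foldl_cons, stepB_empty, pushFromB, dif_pos hwlt,
        show rest = rest.take (runLenM rest (pvCharAt w pos) pos)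
            ++ rest.drop (runLenM rest (pvCharAt w pos) pos)
          from (List.take_append_drop _ rest).symm,
        List.foldl_append]
      rw [foldB_shift pos (pvCharAt w pos) (rest.take (runLenM rest (pvCharAt w pos) pos))
        (pushFromB w (pos + 1)).1 _ hrunc]
      rw [foldB_acc (pos + 1) (rest.take (runLenM rest (pvCharAt w pos) pos))
        (pushFromB w (pos + 1)).1 _]
      -- now split on whether a run-breaking word remains
      cases hdrop : rest.drop (runLenM rest (pvCharAt w pos) pos) with
      | nil =>
        simp only [List.foldl_nil, loopM]
        rw [← hF]
        simp [closesB, String.append_assoc]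
      | cons w2 tl =>
        have hw2mem : w2 ∈ rest := List.drop_subset _ _ (hdrop ▸ List.mem_cons_self ..)
        have hlt2 : pos < PySem.Str.len w2 := (hall w2 (List.mem_cons_of_mem _ hw2mem)).1
        have hne2 : pvCharAt w2 pos ≠ pvCharAt w pos :=
          runLenM_drop pos (pvCharAt w pos) rest w2 tl hdrop
        simp only [List.foldl_cons]
        rw [stepB_break pos (pvCharAt w pos) _ _ w2 hlt2 hne2, ← List.foldl_cons]
        have hlen2 : (w2 :: tl).length ≤ m := by
          have h1 : (rest.drop (runLenM rest (pvCharAt w pos) pos)).length ≤ rest.length :=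
            (List.length_drop ..) ▸ Nat.sub_le _ _
          rw [hdrop] at h1
          simp only [List.length_cons] at hlen h1 ⊢
          omega
        have hall2 : ∀ w' ∈ w2 :: tl, pos < PySem.Str.len w' ∧ PySem.Str.len w' ≤ pos + (n + 1) := by
          intro w' hm
          exact hall w' (List.mem_cons_of_mem _ (List.drop_subset _ _ (hdrop ▸ hm)))
        rw [ih (w2 :: tl) pos _ hlen2 hall2]
        rw [← hF]
        simp [closesB, String.append_assoc]

theorem mainB : ∀ (n : Nat) (ws : List String) (pos : Int) (out : String),
    (∀ w ∈ ws, PySem.Str.len w ≤ pos + n) →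
    (ws.foldl (stepB pos) ([], out)).2 ++ closesB (ws.foldl (stepB pos) ([], out)).1.length
      = out ++ genMFuel (n + 1) ws pos := by
  intro n
  induction n with
  | zero =>
    intro ws pos out hb
    have hfe : ws.filter (fun w => decide (pos < PySem.Str.len w)) = [] := by
      simp only [List.filter_eq_nil_iff]
      intro w hm
      have hh := hb w hm
      rw [PySem.Str.len_eq, String.length_toList] at hh
      simp only [decide_eq_true_eq, PySem.Str.len_eq, String.length_toList]
      push_cast at hh
      omega
    rw [foldl_filter_of_skip (stepB pos) (fun w => decide (pos < PySem.Str.len w))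
      (fun s w hp => by obtain ⟨st, o⟩ := s; exact stepB_skip pos st o w (by simpa using hp))
      ws ([], out)]
    simp only [genMFuel]
    rw [hfe]
    simp [loopM, closesB]
  | succ n ihn =>
    intro ws pos out hb
    rw [foldl_filter_of_skip (stepB pos) (fun w => decide (pos < PySem.Str.len w))
      (fun s w hp => by obtain ⟨st, o⟩ := s; exact stepB_skip pos st o w (by simpa using hp))
      ws ([], out)]
    simp only [genMFuel]
    apply auxB n ihn (ws.filter (fun w => decide (pos < PySem.Str.len w))).length _ pos out le_rfl
    intro w hm
    have hp : pos < PySem.Str.len w := by simpa using List.of_mem_filter hm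
    have hmem : w ∈ ws := List.mem_of_mem_filter hm
    have := hb w hmem
    push_cast at this ⊢
    exact ⟨hp, by omega⟩

theorem foldr_max_ge : ∀ (ws : List String), ∀ w ∈ ws,
    (PySem.Str.len w).toNat ≤ ws.foldr (fun w m => max (PySem.Str.len w).toNat m) 0 := by
  intro ws
  induction ws with
  | nil => intro w hm; simp at hm
  | cons w0 rest ih =>
    intro w hm
    rcases List.mem_cons.1 hm with h | h
    · subst h; simp only [List.foldr_cons]; omega
    · have := ih w h; simp only [List.foldr_cons]; omega

theorem genMB (ws : List String) (pos : Int) :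
    generate_node_alt ws pos = genMFuel (pvFuel ws pos) ws pos := by
  have hb : ∀ w ∈ ws, PySem.Str.len w
      ≤ pos + (ws.foldr (fun w m => max (PySem.Str.len w).toNat m) 0 + (-pos).toNat) := by
    intro w hm
    have h1 := foldr_max_ge ws w hm
    have h0 : 0 ≤ PySem.Str.len w := by
      rw [PySem.Str.len_eq]; positivity
    omega
  have h := mainB (ws.foldr (fun w m => max (PySem.Str.len w).toNat m) 0 + (-pos).toNat) ws pos "" hb
  rw [String.empty_append] at h
  simpa [generate_node_alt, pvFuel] using h

-- ===== VERDICT (by name: the statement is the Claim_ definition above) =====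
theorem generate_node_spec : Claim_equal_generate_node := by
  intro words pos _ _
  unfold Spec_generate_node generate_node
  rw [genAM, ← genMB]
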